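-- pv_equiv track=rewrite | github.com/karkouri-zakaria/Academic_projects | MyProjects/Tetris/Source_code.py | detecteAlignement
-- ===== SOURCE A (Python) =====
-- def detecteAlignement(rangee):
--     n,x,score,count=len(rangee),rangee[0],0,1
--     marking=[False for j in range(n)]
--     for i in range(1,n):
--         y=rangee[i]
--         if y==x and y!="VIDE": count+=1
--         else:
--             if count>2:
--                 score+=count-2
--                 for j in range(count):marking[i-1-j]=True
--             count,x=1,y
--     if count>2:
--         score+=count-2
--         for j in range(count):marking[n-1-j]=True
--     return (marking, score)
-- ===== SOURCE B (Python) =====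
-- def detecteAlignement(rangee):
--     n = len(rangee)
--     marking, score = [], 0
--     i = 0
--     while i < n:
--         v = rangee[i]
--         j = i + 1
--         while j < n and rangee[j] == v:
--             j += 1
--         L = j - i
--         keep = v != "VIDE" and L > 2
--         marking += [keep] * L
--         if keep:
--             score += L - 2
--         i = j
--     return (marking, score)
-- ===== Notes on version B (the rewrite author's own statement) =====
-- stated objective: simpler
-- what changed: Replaces A's inline run-length state machine (count/x state, backward in-place marking of a preallocated list, duplicated end-of-loop flush) by a single run-at-a-time scan that finds each maximal equal run with an inner scan and appends its marks in one piece, with no final flush case.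
import Mathlib
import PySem

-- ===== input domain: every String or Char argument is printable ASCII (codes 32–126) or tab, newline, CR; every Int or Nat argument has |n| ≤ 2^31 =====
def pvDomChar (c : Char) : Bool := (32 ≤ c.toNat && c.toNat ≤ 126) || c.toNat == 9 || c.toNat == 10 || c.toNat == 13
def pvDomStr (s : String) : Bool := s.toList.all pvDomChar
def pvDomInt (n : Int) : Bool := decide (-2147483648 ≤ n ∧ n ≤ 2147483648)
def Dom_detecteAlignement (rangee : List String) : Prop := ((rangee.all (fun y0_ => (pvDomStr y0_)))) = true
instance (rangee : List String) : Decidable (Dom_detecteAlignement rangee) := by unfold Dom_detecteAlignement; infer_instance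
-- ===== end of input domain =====

-- B replaces A's inline run-length state machine (count/x state, backward in-place marking,
-- duplicated end-of-loop flush) by a run-at-a-time scan that appends each maximal run's marks
-- in one piece and needs no duplicated final flush; objective: simpler.

-- ===== PORT A =====
-- inner loop 'for j in range(count): marking[i-1-j] = True'; the indices i-1-j are genuine
-- naturals here (count ≤ i whenever A flushes), so Nat subtraction is exact
def detAFlush (marking : List Bool) (i : Nat) (count : Nat) : List Bool :=
  (List.range count).foldl (fun m j => m.set (i - 1 - j) true) marking

-- body of A's 'for i in range(1, n)' loop; state (marking, score, count, x); rangee[i] is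
-- always in range for the indices supplied, so getD is exact
def detAStep (rangee : List String) (st : List Bool × Int × Nat × String) (i : Nat) :
    List Bool × Int × Nat × String :=
  let y := rangee.getD i ""
  if y = st.2.2.2 ∧ y ≠ "VIDE" then (st.1, st.2.1, st.2.2.1 + 1, st.2.2.2)
  else if st.2.2.1 > 2 then
    (detAFlush st.1 i st.2.2.1, st.2.1 + (st.2.2.1 : Int) - 2, 1, y)
  else (st.1, st.2.1, 1, y)

-- A's trailing 'if count > 2: …' after the loop
def detAFin (n : Nat) (st : List Bool × Int × Nat × String) : List Bool × Int :=
  if st.2.2.1 > 2 then (detAFlush st.1 n st.2.2.1, st.2.1 + (st.2.2.1 : Int) - 2)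
  else (st.1, st.2.1)

def detecteAlignement (rangee : List String) : List Bool × Int :=
  let n := rangee.length
  let x := rangee.getD 0 ""      -- rangee[0]: raises IndexError on [], excluded by Pre_
  detAFin n ((List.range' 1 (n - 1)).foldl (detAStep rangee)
    (List.replicate n false, 0, 1, x))

-- ===== PORT B =====
-- inner 'while j < n and rangee[j] == v: j += 1'; fuel only makes the recursion structural
def detScan (rangee : List String) (v : String) (j fuel : Nat) : Nat :=
  match fuel with
  | 0 => j
  | fuel + 1 =>
    if j < rangee.length then
      (if rangee.getD j "" == v then detScan rangee v (j + 1) fuel else j)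
    else j

-- outer 'while i < n' loop of Source B; fuel only makes the recursion structural
def detOuter (rangee : List String) (i : Nat) (marking : List Bool) (score : Int)
    (fuel : Nat) : List Bool × Int :=
  match fuel with
  | 0 => (marking, score)
  | fuel + 1 =>
    if i < rangee.length then
      let v := rangee.getD i ""
      let j := detScan rangee v (i + 1) rangee.length
      let L := j - i
      let keep := decide (v ≠ "VIDE" ∧ L > 2)
      detOuter rangee j (marking ++ List.replicate L keep)
        (if keep then score + (L : Int) - 2 else score) fuel
    else (marking, score)

def detecteAlignement_alt (rangee : List String) : List Bool × Int :=
  detOuter rangee 0 [] 0 (rangee.length + 1)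

-- ===== PRECONDITION & SPEC =====
-- Pre_ excludes only the empty list, on which Python A raises IndexError at rangee[0]
-- (B returns ([], 0) there)
def Pre_detecteAlignement (rangee : List String) : Prop := rangee ≠ []
instance (rangee : List String) : Decidable (Pre_detecteAlignement rangee) := by
  unfold Pre_detecteAlignement; infer_instance

def pvWitness_detecteAlignement : List String := ["a", "a", "a", "VIDE", "b"]

def Spec_detecteAlignement (rangee : List String) (out : List Bool × Int) : Prop :=
  out = detecteAlignement_alt rangee
instance (rangee : List String) (out : List Bool × Int) :
    Decidable (Spec_detecteAlignement rangee out) := by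
  unfold Spec_detecteAlignement; infer_instance

-- ===== CLAIM (what is proved, stated in full; the proofs are below) =====
def Claim_equal_detecteAlignement : Prop :=
  ∀ (rangee : List String), Dom_detecteAlignement rangee →
    Pre_detecteAlignement rangee →
    Spec_detecteAlignement rangee (detecteAlignement rangee)

-- ===== LEMMAS AND PROOFS =====

-- functional mirror of A's pending-run state: marks/score contributed by the current run of
-- value v, length c so far, followed by the rest of the row
def pend (v : String) (c : Nat) : List String → List Bool × Int
  | [] => (List.replicate c (decide (c > 2)), if c > 2 then (c : Int) - 2 else 0)
  | y :: t =>
    if y = v ∧ y ≠ "VIDE" then pend v (c + 1) t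
    else
      let r := pend y 1 t
      (List.replicate c (decide (c > 2)) ++ r.1,
        (if c > 2 then (c : Int) - 2 else 0) + r.2)

def pendTail : List String → List Bool × Int
  | [] => ([], 0)
  | y :: t => pend y 1 t

-- run decomposition: B's per-run marks/score
def runsSpec : List String → List Bool × Int
  | [] => ([], 0)
  | v :: t =>
    let k := (t.takeWhile (· == v)).length
    let r := runsSpec (t.dropWhile (· == v))
    (List.replicate (k + 1) (decide (v ≠ "VIDE" ∧ k + 1 > 2)) ++ r.1,
      (if v ≠ "VIDE" ∧ k + 1 > 2 then ((k + 1 : Nat) : Int) - 2 else 0) + r.2)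
termination_by t => t.length
decreasing_by simpa using Nat.lt_succ_of_le (List.length_dropWhile_le ..)

theorem getD_append_cons {α : Type} (pre : List α) (y : α) (t : List α) (d : α) :
    (pre ++ y :: t).getD pre.length d = y := by
  simp [List.getD]

theorem detAFlush_eq (c : Nat) (done rest : List Bool) :
    detAFlush (done ++ List.replicate c false ++ rest) (done.length + c) c
      = done ++ List.replicate c true ++ rest := by
  induction c generalizing done with
  | zero => simp [detAFlush]
  | succ c ih =>
    have h1 : done ++ List.replicate (c + 1) false ++ rest
        = (done ++ [false]) ++ List.replicate c false ++ rest := by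
      simp [List.replicate_succ]
    have h2 : done.length + (c + 1) = (done ++ [false]).length + c := by simp; omega
    have hmid := ih (done ++ [false])
    simp only [detAFlush, List.range_succ, List.foldl_append, List.foldl_cons, List.foldl_nil]
    rw [h1, h2]
    show ((detAFlush ((done ++ [false]) ++ List.replicate c false ++ rest)
        ((done ++ [false]).length + c) c).set ((done ++ [false]).length + c - 1 - c) true)
      = done ++ List.replicate (c + 1) true ++ rest
    rw [hmid]
    have h3 : (done ++ [false]).length + c - 1 - c = done.length := by simp
    rw [h3]
    have : (done ++ [false]) ++ List.replicate c true ++ rest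
        = done ++ false :: (List.replicate c true ++ rest) := by simp
    rw [this, List.set_append_right _ _ (le_refl _)]
    simp [List.replicate_succ]

theorem mlA (t : List String) : ∀ (pre rangee : List String) (done : List Bool)
    (score : Int) (c : Nat) (x : String),
    rangee = pre ++ t → pre.length = done.length + c →
    detAFin rangee.length
      ((List.range' pre.length t.length).foldl (detAStep rangee)
        (done ++ List.replicate (rangee.length - done.length) false, score, c, x))
    = (done ++ (pend x c t).1, score + (pend x c t).2) := by
  induction t with
  | nil =>
    intro pre rangee done score c x hr hlen
    have hl : rangee.length = done.length + c := by simp [hr]; omega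
    simp only [List.length_nil, List.range'_zero, List.foldl_nil, detAFin, hl]
    by_cases hc : c > 2
    · rw [if_pos hc]
      have hfl := detAFlush_eq c done []
      simp only [List.append_nil] at hfl
      simp only [Nat.add_sub_cancel_left]
      rw [hfl, Prod.mk.injEq]
      refine ⟨by simp [pend, hc], by simp [pend, hc]; ring⟩
    · simp only [pend]
      simp [hc]
  | cons y t' ih =>
    intro pre rangee done score c x hr hlen
    have hpre : pre.length ≤ rangee.length := by simp [hr]
    have hlenr : rangee.length = pre.length + t'.length + 1 := by simp [hr]; omega
    simp only [List.length_cons]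
    rw [List.range'_succ, List.foldl_cons]
    have hy : rangee.getD pre.length "" = y := by rw [hr]; exact getD_append_cons ..
    by_cases hc : (y = x ∧ y ≠ "VIDE")
    · -- count += 1
      have hstep : detAStep rangee
          (done ++ List.replicate (rangee.length - done.length) false, score, c, x) pre.length
          = (done ++ List.replicate (rangee.length - done.length) false, score, c + 1, x) := by
        simp only [detAStep, hy]
        rw [if_pos hc]
      rw [hstep]
      have hr' : rangee = (pre ++ [y]) ++ t' := by simp [hr]
      have hlen' : (pre ++ [y]).length = done.length + (c + 1) := by simp; omega
      have := ih (pre ++ [y]) rangee done score (c + 1) x hr' hlen'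
      simp only [List.length_append, List.length_cons, List.length_nil] at this ⊢
      rw [show pre.length + 1 = pre.length + (0 + 1) by omega] at this
      rw [this]
      simp only [pend, if_pos hc]
    · -- flush, reset to (1, y)
      have hsplit : rangee.length - done.length = c + (rangee.length - pre.length) := by omega
      have hflush : detAFlush (done ++ List.replicate (rangee.length - done.length) false)
            pre.length c
          = done ++ List.replicate c true ++ List.replicate (rangee.length - pre.length) false := by
        rw [hsplit, List.replicate_add, ← List.append_assoc, hlen]
        exact detAFlush_eq c done _
      by_cases h2 : c > 2
      · have hstep : detAStep rangee
            (done ++ List.replicate (rangee.length - done.length) false, score, c, x) pre.length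
            = (done ++ List.replicate c true ++ List.replicate (rangee.length - pre.length) false,
                score + (c : Int) - 2, 1, y) := by
          simp only [detAStep, hy]
          rw [if_neg hc, if_pos h2, hflush]
        rw [hstep]
        have hr' : rangee = (pre ++ [y]) ++ t' := by simp [hr]
        have hlen' : (pre ++ [y]).length = (done ++ List.replicate c true).length + 1 := by
          simp; omega
        have hmark : done ++ List.replicate c true ++ List.replicate (rangee.length - pre.length) false
            = (done ++ List.replicate c true)
              ++ List.replicate (rangee.length - (done ++ List.replicate c true).length) false := by
          have : (done ++ List.replicate c true).length = pre.length := by simp [hlen]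
          rw [this]
        have := ih (pre ++ [y]) rangee (done ++ List.replicate c true)
          (score + (c : Int) - 2) 1 y hr' hlen'
        rw [hmark]
        simp only [List.length_append, List.length_cons, List.length_nil] at this ⊢
        rw [show pre.length + 1 = pre.length + (0 + 1) by omega] at this
        rw [this]
        simp only [pend, if_neg hc, Prod.mk.injEq]
        constructor
        · simp [h2]
        · simp [h2]; ring
      · have hstep : detAStep rangee
            (done ++ List.replicate (rangee.length - done.length) false, score, c, x) pre.length
            = (done ++ List.replicate (rangee.length - done.length) false, score, 1, y) := by
          simp only [detAStep, hy]
          rw [if_neg hc, if_neg h2]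
        rw [hstep]
        have hr' : rangee = (pre ++ [y]) ++ t' := by simp [hr]
        have hlen' : (pre ++ [y]).length = (done ++ List.replicate c false).length + 1 := by
          simp; omega
        have hmark : done ++ List.replicate (rangee.length - done.length) false
            = (done ++ List.replicate c false)
              ++ List.replicate (rangee.length - (done ++ List.replicate c false).length) false := by
          rw [hsplit, List.replicate_add]
          simp; omega
        have := ih (pre ++ [y]) rangee (done ++ List.replicate c false) score 1 y hr' hlen'
        rw [hmark]
        simp only [List.length_append, List.length_cons, List.length_nil] at this ⊢
        rw [show pre.length + 1 = pre.length + (0 + 1) by omega] at this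
        rw [this]
        simp only [pend, if_neg hc, Prod.mk.injEq]
        constructor
        · simp [h2]
        · simp [h2]

theorem A_eq_pend (v : String) (t : List String) :
    detecteAlignement (v :: t) = pend v 1 t := by
  have h := mlA t [v] (v :: t) [] 0 1 v (by simp) (by simp)
  simp only [List.length_nil, List.length_cons, List.nil_append,
    Nat.sub_zero, zero_add] at h
  simpa [detecteAlignement] using h

theorem detScan_eq (fuel : Nat) : ∀ (t pre rangee : List String) (v : String),
    rangee = pre ++ t → t.length < fuel →
    detScan rangee v pre.length fuel = pre.length + (t.takeWhile (· == v)).length := by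
  induction fuel with
  | zero => intro t pre rangee v _ h; omega
  | succ fuel ih =>
    intro t pre rangee v hr hf
    match t with
    | [] =>
      have : ¬ pre.length < rangee.length := by simp [hr]
      simp [detScan, this]
    | y :: t' =>
      have hlt : pre.length < rangee.length := by simp [hr]
      have hy : rangee.getD pre.length "" = y := by rw [hr]; exact getD_append_cons ..
      simp only [detScan, if_pos hlt, hy]
      by_cases hv : y = v
      · rw [if_pos (by simp [hv])]
        have := ih t' (pre ++ [y]) rangee v (by simp [hr]) (by simp at hf ⊢; omega)
        simp only [List.length_append, List.length_cons, List.length_nil] at this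
        rw [this]
        simp [hv]
        omega
      · rw [if_neg (by simp [hv])]
        simp [hv]

theorem mlB (fuel : Nat) : ∀ (t pre rangee : List String) (marking : List Bool) (score : Int),
    rangee = pre ++ t → t.length < fuel →
    detOuter rangee pre.length marking score fuel
      = (marking ++ (runsSpec t).1, score + (runsSpec t).2) := by
  induction fuel with
  | zero => intro t pre rangee marking score _ h; omega
  | succ fuel ih =>
    intro t pre rangee marking score hr hf
    match t with
    | [] =>
      have : ¬ pre.length < rangee.length := by simp [hr]
      simp [detOuter, this, runsSpec]
    | v :: t' =>
      have hlt : pre.length < rangee.length := by simp [hr]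
      have hv : rangee.getD pre.length "" = v := by rw [hr]; exact getD_append_cons ..
      have hsc : detScan rangee v (pre.length + 1) rangee.length
          = pre.length + 1 + (t'.takeWhile (· == v)).length := by
        have := detScan_eq rangee.length t' (pre ++ [v]) rangee v (by simp [hr])
          (by simp [hr]; omega)
        simpa using this
      set k := (t'.takeWhile (· == v)).length with hk
      have hkle : k ≤ t'.length := by
        have h0 := congrArg List.length (List.takeWhile_append_dropWhile (p := (· == v)) (l := t'))
        simp only [List.length_append] at h0
        omega
      simp only [detOuter, if_pos hlt, hv, hsc]
      have hL : pre.length + 1 + k - pre.length = k + 1 := by omega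
      rw [hL]
      have hr' : rangee = (pre ++ v :: t'.takeWhile (· == v)) ++ t'.dropWhile (· == v) := by
        simp [hr]
      have hlen' : (pre ++ v :: t'.takeWhile (· == v)).length = pre.length + 1 + k := by
        simp [hk]; omega
      have hrec := ih (t'.dropWhile (· == v)) (pre ++ v :: t'.takeWhile (· == v)) rangee
        (marking ++ List.replicate (k + 1) (decide (v ≠ "VIDE" ∧ k + 1 > 2)))
        (if decide (v ≠ "VIDE" ∧ k + 1 > 2) then score + ((k + 1 : Nat) : Int) - 2 else score)
        hr' (by
          have := List.length_dropWhile_le (p := (· == v)) (l := t')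
          simp at hf; omega)
      rw [hlen'] at hrec
      rw [hrec]
      show _ = (marking ++ (runsSpec (v :: t')).1, score + (runsSpec (v :: t')).2)
      simp only [runsSpec, ← hk, Prod.mk.injEq]
      constructor
      · simp
      · by_cases hkeep : (v ≠ "VIDE" ∧ k + 1 > 2)
        · rw [if_pos (by simpa using hkeep), if_pos hkeep]
          push_cast; ring
        · rw [if_neg (by simpa using hkeep), if_neg hkeep]
          ring

theorem B_eq_runs (rangee : List String) :
    detecteAlignement_alt rangee = runsSpec rangee := by
  have := mlB (rangee.length + 1) rangee [] rangee [] 0 (by simp) (by omega)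
  simp only [List.length_nil] at this
  simpa [detecteAlignement_alt] using this

theorem pend_run (t : List String) : ∀ (v : String) (c : Nat), v ≠ "VIDE" →
    pend v c t
      = (List.replicate (c + (t.takeWhile (· == v)).length)
            (decide (c + (t.takeWhile (· == v)).length > 2))
          ++ (pendTail (t.dropWhile (· == v))).1,
        (if c + (t.takeWhile (· == v)).length > 2
          then ((c + (t.takeWhile (· == v)).length : Nat) : Int) - 2 else 0)
          + (pendTail (t.dropWhile (· == v))).2) := by
  induction t with
  | nil => intro v c hv; simp [pend, pendTail]
  | cons y t' ih =>
    intro v c hv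
    by_cases hy : y = v
    · have hcond : (y = v ∧ y ≠ "VIDE") := ⟨hy, by rw [hy]; exact hv⟩
      simp only [pend, if_pos hcond]
      have hTW : (y :: t').takeWhile (· == v) = y :: t'.takeWhile (· == v) := by
        simp [hy]
      have hDW : (y :: t').dropWhile (· == v) = t'.dropWhile (· == v) := by
        simp [hy]
      rw [hTW, hDW, List.length_cons]
      rw [show c + ((t'.takeWhile (· == v)).length + 1)
          = c + 1 + (t'.takeWhile (· == v)).length by omega]
      exact ih v (c + 1) hv
    · have hcond : ¬ (y = v ∧ y ≠ "VIDE") := by intro h; exact hy h.1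
      simp only [pend, if_neg hcond]
      simp [hy, pendTail]

theorem pend_vide (t : List String) :
    pend "VIDE" 1 t
      = (List.replicate (1 + (t.takeWhile (· == "VIDE")).length) false
          ++ (pendTail (t.dropWhile (· == "VIDE"))).1,
        (pendTail (t.dropWhile (· == "VIDE"))).2) := by
  induction t with
  | nil => simp [pend, pendTail]
  | cons y t' ih =>
    have hcond : ¬ (y = "VIDE" ∧ y ≠ "VIDE") := by
      rintro ⟨h1, h2⟩; exact h2 h1
    simp only [pend, if_neg hcond]
    by_cases hy : y = "VIDE"
    · subst hy
      rw [ih]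
      simp
      rw [show 1 + ((t'.takeWhile (· == "VIDE")).length + 1)
          = 1 + (1 + (t'.takeWhile (· == "VIDE")).length) by omega]
      simp [List.replicate_add]
    · simp [hy, pendTail]

theorem pend_eq_runs (t : List String) (v : String) : pend v 1 t = runsSpec (v :: t) := by
  have htail : pendTail (t.dropWhile (· == v)) = runsSpec (t.dropWhile (· == v)) := by
    match hrest : t.dropWhile (· == v) with
    | [] => simp [pendTail, runsSpec]
    | y :: t'' =>
      have hlt : t''.length < t.length := by
        have := List.length_dropWhile_le (p := (· == v)) (l := t)
        rw [hrest] at this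
        simp at this
        omega
      exact pend_eq_runs t'' y
  by_cases hv : v = "VIDE"
  · subst hv
    rw [pend_vide, htail]
    simp only [runsSpec, Prod.mk.injEq]
    constructor
    · simp
      rw [show (t.takeWhile (· == "VIDE")).length + 1
          = 1 + (t.takeWhile (· == "VIDE")).length by omega]
    · simp
  · rw [pend_run t v 1 hv, htail]
    simp only [runsSpec, Prod.mk.injEq]
    constructor
    · simp [hv]
      exact ⟨by omega, by omega⟩
    · simp [hv]
      split_ifs <;> push_cast <;> omega
termination_by t.length
decreasing_by exact hlt

-- ===== VERDICT (by name: the statement is the Claim_ definition above) =====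
theorem detecteAlignement_spec : Claim_equal_detecteAlignement := by
  intro rangee _ hpre
  unfold Spec_detecteAlignement
  match rangee with
  | [] => exact absurd rfl hpre
  | v :: t =>
    rw [A_eq_pend, B_eq_runs, pend_eq_runs]
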